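-- pv_equiv track=rewrite | github.com/thuva4/Algorithms | tests/runners/cpp_runner.py | should_prefix_count
-- ===== SOURCE A (Python) =====
-- from typing import Any
--
-- def should_prefix_count(key: str, value: Any, mapping: dict[str, Any]) -> bool:
--     if not isinstance(value, list):
--         return False
--     lowered = key.lower()
--     if lowered == "queries" and not any(name in mapping for name in ("q", "query_count", "num_queries")):
--         return True
--     if lowered == "operations" and not any(name in mapping for name in ("m", "operation_count", "num_operations")):
--         return True
--     if lowered == "edges" and not any(name in mapping for name in ("m", "edge_count", "num_edges")):
--         return True
--     return False
-- ===== SOURCE B (Python) =====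
-- # Reverse index: each sentinel name maps to the list-keys whose counting it suppresses.
-- _BLOCKERS = {
--     "q": ("queries",),
--     "query_count": ("queries",),
--     "num_queries": ("queries",),
--     "m": ("operations", "edges"),
--     "operation_count": ("operations",),
--     "num_operations": ("operations",),
--     "edge_count": ("edges",),
--     "num_edges": ("edges",),
-- }
--
-- def should_prefix_count(key, value, mapping):
--     if not isinstance(value, list):
--         return False
--     lowered = key.lower()
--     if lowered not in ("queries", "operations", "edges"):
--         return False
--     for present in mapping:
--         if lowered in _BLOCKERS.get(present, ()):
--             return False
--     return True
-- ===== Notes on version B (the rewrite author's own statement) =====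
-- stated objective: alternative
-- what changed: Inverts the traversal: instead of testing each key-specific sentinel name for membership in the mapping, B makes a single pass over the mapping's keys and rejects via a reverse index from each sentinel name to the list-keys it blocks.
import Mathlib
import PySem

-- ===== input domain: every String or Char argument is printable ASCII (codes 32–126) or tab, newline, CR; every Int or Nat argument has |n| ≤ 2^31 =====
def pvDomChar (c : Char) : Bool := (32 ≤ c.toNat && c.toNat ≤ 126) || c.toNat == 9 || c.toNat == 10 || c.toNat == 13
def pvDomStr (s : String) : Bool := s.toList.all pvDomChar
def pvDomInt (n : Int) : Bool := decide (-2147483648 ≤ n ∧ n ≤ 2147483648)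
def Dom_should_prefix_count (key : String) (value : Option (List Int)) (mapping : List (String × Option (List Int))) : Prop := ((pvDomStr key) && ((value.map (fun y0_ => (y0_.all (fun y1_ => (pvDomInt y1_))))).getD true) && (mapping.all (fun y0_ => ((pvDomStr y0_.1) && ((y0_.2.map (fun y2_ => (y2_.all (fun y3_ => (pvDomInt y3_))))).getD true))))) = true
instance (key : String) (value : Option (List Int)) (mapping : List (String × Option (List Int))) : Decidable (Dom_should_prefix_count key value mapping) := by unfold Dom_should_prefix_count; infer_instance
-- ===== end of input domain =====

set_option maxRecDepth 20000


-- B inverts A's traversal: one pass over the mapping's keys with a reverse index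
-- sentinel-name → blocked list-keys, instead of per-branch sentinel membership tests (objective: alternative).

-- ===== PORT A =====
def should_prefix_count (key : String) (value : Option (List Int)) (mapping : List (String × Option (List Int))) : Bool :=
  match value with
  | none => false                           -- not isinstance(value, list)
  | some _ =>
    let lowered := PySem.Str.lower key
    if lowered == "queries" && !(["q", "query_count", "num_queries"].any (fun name => mapping.any (fun p => p.1 == name))) then true
    else if lowered == "operations" && !(["m", "operation_count", "num_operations"].any (fun name => mapping.any (fun p => p.1 == name))) then true
    else if lowered == "edges" && !(["m", "edge_count", "num_edges"].any (fun name => mapping.any (fun p => p.1 == name))) then true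
    else false

-- ===== PORT B =====
def pvBlockers : PySem.Dict String (List String) :=
  PySem.Dict.ofList
    [("q", ["queries"]), ("query_count", ["queries"]), ("num_queries", ["queries"]),
     ("m", ["operations", "edges"]), ("operation_count", ["operations"]), ("num_operations", ["operations"]),
     ("edge_count", ["edges"]), ("num_edges", ["edges"])]

def should_prefix_count_alt (key : String) (value : Option (List Int)) (mapping : List (String × Option (List Int))) : Bool :=
  match value with
  | none => false                           -- not isinstance(value, list)
  | some _ =>
    let lowered := PySem.Str.lower key
    if !(["queries", "operations", "edges"].contains lowered) then false
    else !(mapping.any (fun p => (pvBlockers.getD p.1 []).contains lowered))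

-- ===== PRECONDITION & SPEC =====
def Spec_should_prefix_count (key : String) (value : Option (List Int)) (mapping : List (String × Option (List Int))) (out : Bool) : Prop := out = should_prefix_count_alt key value mapping
instance (key : String) (value : Option (List Int)) (mapping : List (String × Option (List Int))) (out : Bool) : Decidable (Spec_should_prefix_count key value mapping out) := by unfold Spec_should_prefix_count; infer_instance

-- ===== CLAIM (what is proved, stated in full; the proofs are below) =====
def Claim_equal_should_prefix_count : Prop := ∀ (key : String) (value : Option (List Int)) (mapping : List (String × Option (List Int))), Dom_should_prefix_count key value mapping → Spec_should_prefix_count key value mapping (should_prefix_count key value mapping)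

-- ===== LEMMAS AND PROOFS =====
-- per-element bridges: A's sentinel tuple for each recognized key, as a predicate on one
-- mapping key s, coincides with B's reverse-index lookup at s.
theorem bridge_q (s : String) :
    (["q", "query_count", "num_queries"].any (fun name => s == name))
      = ((pvBlockers.getD s []).contains "queries") := by
  have h : pvBlockers = PySem.Dict.mk
      [("q", ["queries"]), ("query_count", ["queries"]), ("num_queries", ["queries"]),
       ("m", ["operations", "edges"]), ("operation_count", ["operations"]), ("num_operations", ["operations"]),
       ("edge_count", ["edges"]), ("num_edges", ["edges"])] := rfl
  rw [h]
  clear h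
  simp only [PySem.Dict.getD_eq_get?_getD, PySem.Dict.get?, List.find?]
  repeat' split
  all_goals (try (simp only [beq_iff_eq, beq_eq_false_iff_ne] at *); try subst_vars; simp_all [ne_comm])

theorem bridge_ops (s : String) :
    (["m", "operation_count", "num_operations"].any (fun name => s == name))
      = ((pvBlockers.getD s []).contains "operations") := by
  have h : pvBlockers = PySem.Dict.mk
      [("q", ["queries"]), ("query_count", ["queries"]), ("num_queries", ["queries"]),
       ("m", ["operations", "edges"]), ("operation_count", ["operations"]), ("num_operations", ["operations"]),
       ("edge_count", ["edges"]), ("num_edges", ["edges"])] := rfl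
  rw [h]
  clear h
  simp only [PySem.Dict.getD_eq_get?_getD, PySem.Dict.get?, List.find?]
  repeat' split
  all_goals (try (simp only [beq_iff_eq, beq_eq_false_iff_ne] at *); try subst_vars; simp_all [ne_comm])

theorem bridge_edges (s : String) :
    (["m", "edge_count", "num_edges"].any (fun name => s == name))
      = ((pvBlockers.getD s []).contains "edges") := by
  have h : pvBlockers = PySem.Dict.mk
      [("q", ["queries"]), ("query_count", ["queries"]), ("num_queries", ["queries"]),
       ("m", ["operations", "edges"]), ("operation_count", ["operations"]), ("num_operations", ["operations"]),
       ("edge_count", ["edges"]), ("num_edges", ["edges"])] := rfl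
  rw [h]
  clear h
  simp only [PySem.Dict.getD_eq_get?_getD, PySem.Dict.get?, List.find?]
  repeat' split
  all_goals (try (simp only [beq_iff_eq, beq_eq_false_iff_ne] at *); try subst_vars; simp_all [ne_comm])

-- swapping the two 'any' loops (A scans sentinel names, B scans the mapping)
theorem any_swap (names : List String) (mapping : List (String × Option (List Int))) (lowered : String)
    (h : ∀ s : String, (names.any (fun name => s == name)) = ((pvBlockers.getD s []).contains lowered)) :
    (names.any (fun name => mapping.any (fun p => p.1 == name)))
      = (mapping.any (fun p => (pvBlockers.getD p.1 []).contains lowered)) := by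
  rw [Bool.eq_iff_iff]
  simp only [List.any_eq_true]
  constructor
  · rintro ⟨n, hn, p, hp, he⟩
    refine ⟨p, hp, ?_⟩
    rw [← h p.1]
    simp only [List.any_eq_true]
    exact ⟨n, hn, he⟩
  · rintro ⟨p, hp, hb⟩
    rw [← h p.1] at hb
    simp only [List.any_eq_true] at hb
    obtain ⟨n, hn, he⟩ := hb
    exact ⟨n, hn, p, hp, he⟩

-- ===== VERDICT (by name: the statement is the Claim_ definition above) =====
theorem should_prefix_count_spec : Claim_equal_should_prefix_count := by
  intro key value mapping _
  unfold Spec_should_prefix_count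
  rcases value with _ | v
  · rfl
  · simp only [should_prefix_count, should_prefix_count_alt]
    by_cases h1 : PySem.Str.lower key = "queries"
    · rw [h1, any_swap ["q", "query_count", "num_queries"] mapping "queries" bridge_q]
      simp
    · by_cases h2 : PySem.Str.lower key = "operations"
      · rw [h2, any_swap ["m", "operation_count", "num_operations"] mapping "operations" bridge_ops]
        simp
      · by_cases h3 : PySem.Str.lower key = "edges"
        · rw [h3, any_swap ["m", "edge_count", "num_edges"] mapping "edges" bridge_edges]
          simp
        · simp [h1, h2, h3]
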